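-- pv_equiv track=rewrite | github.com/Symbolk/AlgInPy | trie/820short-encoding-of-words.py | minimumLengthEncoding4
-- ===== SOURCE A (Python) =====
-- from typing import List
--
-- def minimumLengthEncoding4(words: List[str]) -> int:
--     N = len(words)
--     # reverse words and sort
--     words = sorted([w[::-1] for w in words])
--
--     res = 0
--     for i in range(N):
--         if i + 1 < N and words[i + 1].startswith(words[i]):
--             pass
--         else:
--             res += len(words[i]) + 1
--     return res
-- ===== SOURCE B (Python) =====
-- def minimumLengthEncoding4(words):
--     good = set(words)
--     for w in list(good):
--         for i in range(1, len(w) + 1):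
--             good.discard(w[i:])
--     return sum(len(w) + 1 for w in good)
-- ===== Notes on version B (the rewrite author's own statement) =====
-- stated objective: idiomatic
-- what changed: Replaces reverse-each-word + sort + adjacent-prefix scan with a word set from which every proper suffix of every word is discarded, then sums len+1 over the survivors.
import Mathlib
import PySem

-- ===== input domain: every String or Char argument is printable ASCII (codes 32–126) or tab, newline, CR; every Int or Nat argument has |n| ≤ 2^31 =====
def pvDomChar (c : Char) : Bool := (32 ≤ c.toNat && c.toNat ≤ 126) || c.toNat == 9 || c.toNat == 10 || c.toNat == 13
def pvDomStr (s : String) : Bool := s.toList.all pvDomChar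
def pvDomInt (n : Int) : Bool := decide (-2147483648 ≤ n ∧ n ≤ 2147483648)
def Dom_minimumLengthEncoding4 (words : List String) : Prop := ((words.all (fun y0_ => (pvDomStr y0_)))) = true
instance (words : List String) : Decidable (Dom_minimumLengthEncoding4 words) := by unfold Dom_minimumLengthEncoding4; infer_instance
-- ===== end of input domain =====

-- B replaces A's reverse-each-word + sort + adjacent-prefix scan by a word set from which
-- every proper suffix of every word is discarded, then sums len+1 over the survivors (idiomatic).

-- ===== PORT A =====
def minimumLengthEncoding4 (words : List String) : Int :=
  let N : Nat := words.length
  let ws : List String :=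
    PySem.List.sorted (words.map (fun w => (PySem.Str.slice? w none none (-1)).getD "")) (fun x => x) false
  (PySem.List.pyRange 0 (N : Int) 1).foldl
    (fun res i =>
      if (i + 1 < (N : Int) ∧
          PySem.Str.startswith (PySem.List.pyGetD ws (i + 1) "") (PySem.List.pyGetD ws i "") = true)
      then res
      else res + PySem.Str.len (PySem.List.pyGetD ws i "") + 1) 0

-- ===== PORT B =====
def minimumLengthEncoding4_alt (words : List String) : Int :=
  let good0 : PySem.Set String := PySem.Set.ofList words
  let good : PySem.Set String :=
    good0.foldl (fun s w =>
      (PySem.List.pyRange 1 (PySem.Str.len w + 1) 1).foldl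
        (fun s i => PySem.Set.discard s (PySem.Str.slice w (some i) none)) s) good0
  (good.map (fun w => PySem.Str.len w + 1)).sum

-- ===== PRECONDITION & SPEC =====
def Spec_minimumLengthEncoding4 (words : List String) (out : Int) : Prop := out = minimumLengthEncoding4_alt words
instance (words : List String) (out : Int) : Decidable (Spec_minimumLengthEncoding4 words out) := by unfold Spec_minimumLengthEncoding4; infer_instance

-- ===== CLAIM (what is proved, stated in full; the proofs are below) =====
def Claim_equal_minimumLengthEncoding4 : Prop := ∀ (words : List String), Dom_minimumLengthEncoding4 words → Spec_minimumLengthEncoding4 words (minimumLengthEncoding4 words)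

-- ===== LEMMAS AND PROOFS =====

-- the reversed word, as port A computes it
def pvRev (w : String) : String := String.ofList w.toList.reverse

-- "u is not a proper prefix of another element of l"  (reversed world, A's side)
def pvPGood (l : List String) (u : String) : Bool :=
  !(l.any (fun y => decide (u ≠ y) && decide (u.toList <+: y.toList)))

-- "w is not a proper suffix of another element of l"  (B's side)
def pvSGood (l : List String) (w : String) : Bool :=
  !(l.any (fun v => decide (w ≠ v) && decide (w.toList <:+ v.toList)))

lemma pvPGood_iff (l : List String) (u : String) :
    pvPGood l u = true ↔ ¬ ∃ y ∈ l, u ≠ y ∧ u.toList <+: y.toList := by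
  simp [pvPGood]

lemma pvSGood_iff (l : List String) (w : String) :
    pvSGood l w = true ↔ ¬ ∃ v ∈ l, w ≠ v ∧ w.toList <:+ v.toList := by
  simp [pvSGood]

def pvH (l : List String) (u : String) : Int :=
  if pvPGood l u then (u.toList.length : Int) + 1 else 0

-- A's adjacent-pair scan, written structurally
def pvAdjSum : List String → Int
  | [] => 0
  | [x] => PySem.Str.len x + 1
  | x :: y :: t =>
      (if PySem.Str.startswith y x then 0 else PySem.Str.len x + 1) + pvAdjSum (y :: t)

lemma pvRev_toList (w : String) : (pvRev w).toList = w.toList.reverse := by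
  simp [pvRev]

lemma pvRev_inj : Function.Injective pvRev := by
  intro a b h
  have := congrArg String.toList h
  simp [pvRev] at this
  exact String.toList_inj.mp this

-- a proper prefix is lexicographically smaller
lemma pvLex_of_prefix : ∀ (a b : List Char), a <+: b → a ≠ b → List.Lex (· < ·) a b := by
  intro a
  induction a with
  | nil =>
      intro b _ hne
      cases b with
      | nil => exact absurd rfl hne
      | cons c t => exact List.Lex.nil
  | cons x xs ih =>
      intro b hp hne
      rcases b with _ | ⟨y, ys⟩
      · exact absurd (List.prefix_nil.mp hp) hne
      · rcases (List.cons_prefix_cons.mp hp) with ⟨hxy, hp'⟩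
        subst hxy
        exact List.Lex.cons (ih ys hp' (fun h => hne (by rw [h])))

lemma pvStr_lt_of_prefix (u x : String) (hp : u.toList <+: x.toList) (hne : u ≠ x) : u < x := by
  rw [String.lt_iff_toList_lt]
  exact (List.lt_iff_lex_lt _ _).mpr (pvLex_of_prefix _ _ hp (fun h => hne (String.toList_inj.mp h)))

-- between lemma: x lex-≤ z lex-≤ y and x prefix of y imply x prefix of z
lemma pvLex_between : ∀ (x z y : List Char), List.Lex (· < ·) x z → List.Lex (· < ·) z y →
    x <+: y → x <+: z := by
  intro x
  induction x with
  | nil => intro z y _ _ _; exact List.nil_prefix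
  | cons a xs ih =>
      intro z y hxz hzy hp
      cases hxz with
      | cons hxz' =>
          cases hzy with
          | cons hzy' =>
              rcases List.cons_prefix_cons.mp hp with ⟨_, hp'⟩
              exact List.cons_prefix_cons.mpr ⟨rfl, ih _ _ hxz' hzy' hp'⟩
          | rel hab =>
              rcases List.cons_prefix_cons.mp hp with ⟨he, _⟩
              exact absurd (he ▸ hab) (lt_irrefl _)
      | rel hac =>
          cases hzy with
          | cons hzy' =>
              rcases List.cons_prefix_cons.mp hp with ⟨he, _⟩
              exact absurd (he ▸ hac) (lt_irrefl _)
          | rel hcb =>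
              rcases List.cons_prefix_cons.mp hp with ⟨he, _⟩
              subst he
              exact absurd (lt_trans hac hcb) (lt_irrefl _)

lemma pvStr_between (x z y : String) (hxz : x ≤ z) (hzy : z ≤ y)
    (hp : x.toList <+: y.toList) : x.toList <+: z.toList := by
  rcases eq_or_lt_of_le hxz with h | h
  · subst h; exact List.prefix_refl _
  · rcases eq_or_lt_of_le hzy with h2 | h2
    · subst h2; exact hp
    · have hx := (List.lt_iff_lex_lt _ _).mp (String.lt_iff_toList_lt.mp h)
      have hz := (List.lt_iff_lex_lt _ _).mp (String.lt_iff_toList_lt.mp h2)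
      exact pvLex_between _ _ _ hx hz hp

lemma pvPGood_cons (x : String) (l : List String) (u : String) (hxu : x ≤ u) :
    pvPGood (x :: l) u = pvPGood l u := by
  simp only [pvPGood, List.any_cons, Bool.not_or]
  have : (decide (u ≠ x) && decide (u.toList <+: x.toList)) = false := by
    by_cases hne : u = x
    · simp [hne]
    · by_cases hp : u.toList <+: x.toList
      · exact absurd hxu (not_le.mpr (pvStr_lt_of_prefix u x hp hne))
      · simp [hp]
  rw [this]
  simp

lemma pvH_cons (x : String) (l : List String) (u : String) (hxu : x ≤ u) :
    pvH (x :: l) u = pvH l u := by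
  unfold pvH
  rw [pvPGood_cons _ _ _ hxu]

lemma pvStartswith_self (x : String) : PySem.Str.startswith x x = true := by
  rw [PySem.Str.startswith_eq]
  exact (PySem.Chars.startswith_iff _ _).mpr (List.prefix_refl _)

lemma pvAdjSum_sorted : ∀ (L : List String), L.Pairwise (· ≤ ·) →
    pvAdjSum L = (L.dedup.map (pvH L)).sum := by
  intro L
  induction L with
  | nil => intro _; simp [pvAdjSum]
  | cons x t ih =>
      intro hp
      rcases List.pairwise_cons.mp hp with ⟨hx, hp'⟩
      cases t with
      | nil =>
          simp [pvAdjSum, pvH, pvPGood, PySem.Str.len_eq]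
      | cons y t' =>
          have hxy : x ≤ y := hx y (by simp)
          have hyt : ∀ z ∈ t', y ≤ z := (List.pairwise_cons.mp hp').1
          have ihEq : pvAdjSum (y :: t') = ((y :: t').dedup.map (pvH (y :: t'))).sum := ih hp'
          have hcong : ((y :: t').dedup.map (pvH (x :: y :: t'))).sum =
              ((y :: t').dedup.map (pvH (y :: t'))).sum := by
            apply congrArg
            apply List.map_congr_left
            intro u hu
            exact pvH_cons x (y :: t') u (hx u (List.mem_dedup.mp hu))
          by_cases hs : PySem.Str.startswith y x = true
          · have hpfx : x.toList <+: y.toList := by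
              rw [PySem.Str.startswith_eq] at hs
              exact (PySem.Chars.startswith_iff _ _).mp hs
            by_cases hxy' : x = y
            · subst hxy'
              rw [List.dedup_cons_of_mem (List.mem_cons_self)]
              show pvAdjSum (x :: x :: t') = ((x :: t').dedup.map (pvH (x :: x :: t'))).sum
              have hcong2 : ((x :: t').dedup.map (pvH (x :: x :: t'))).sum =
                  ((x :: t').dedup.map (pvH (x :: t'))).sum := by
                apply congrArg
                apply List.map_congr_left
                intro u hu
                exact pvH_cons x (x :: t') u (hx u (List.mem_dedup.mp hu))
              rw [hcong2, ← ihEq]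
              have hss : PySem.Chars.startswith x.toList x.toList = true :=
                (PySem.Chars.startswith_iff _ _).mpr (List.prefix_refl _)
              simp [pvAdjSum, hss]
            · have hlt : x < y := pvStr_lt_of_prefix x y hpfx hxy'
              have hxnot : x ∉ y :: t' := by
                intro hm
                rcases List.mem_cons.mp hm with h | h
                · exact hxy' h
                · exact absurd hlt (not_lt.mpr (le_trans (hyt x h) (le_refl x)))
              rw [List.dedup_cons_of_notMem hxnot, List.map_cons, List.sum_cons]
              have hbad : pvH (x :: y :: t') x = 0 := by
                unfold pvH
                have : pvPGood (x :: y :: t') x = false := by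
                  rw [← Bool.not_eq_true, pvPGood_iff]
                  simp only [not_not]
                  exact ⟨y, by simp, hxy', hpfx⟩
                rw [this]
                simp
              rw [hbad, hcong, ← ihEq]
              have hs' : PySem.Chars.startswith y.toList x.toList = true := by
                rw [PySem.Str.startswith_eq] at hs; exact hs
              simp [pvAdjSum, hs']
          · have hxnot : x ∉ y :: t' := by
              intro hm
              rcases List.mem_cons.mp hm with h | h
              · subst h; exact hs (pvStartswith_self x)
              · have : x = y := le_antisymm hxy (hyt x h)
                subst this; exact hs (pvStartswith_self x)
            rw [List.dedup_cons_of_notMem hxnot, List.map_cons, List.sum_cons]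
            have hgood : pvH (x :: y :: t') x = (x.toList.length : Int) + 1 := by
              unfold pvH
              have : pvPGood (x :: y :: t') x = true := by
                rw [pvPGood_iff]
                rintro ⟨v, hv, hne, hp2⟩
                rcases List.mem_cons.mp hv with h | h
                · exact hne h.symm
                rcases List.mem_cons.mp h with h | h
                · subst h
                  exact hs (by rw [PySem.Str.startswith_eq]
                               exact (PySem.Chars.startswith_iff _ _).mpr hp2)
                · have hyv : y ≤ v := hyt v h
                  have := pvStr_between x y v hxy hyv hp2
                  exact hs (by rw [PySem.Str.startswith_eq]
                               exact (PySem.Chars.startswith_iff _ _).mpr this)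
              rw [this]
              simp
            rw [hgood, hcong, ← ihEq]
            have hs' : PySem.Chars.startswith y.toList x.toList = false := by
              rw [PySem.Str.startswith_eq] at hs
              exact Bool.eq_false_iff.mpr hs
            simp [pvAdjSum, hs', PySem.Str.len_eq]

lemma pvSumRange : ∀ (L : List String),
    ((List.range L.length).map (fun i =>
      if (i + 1 < L.length ∧
          PySem.Str.startswith (L.getD (i + 1) "") (L.getD i "") = true)
      then (0 : Int) else PySem.Str.len (L.getD i "") + 1)).sum = pvAdjSum L := by
  intro L
  induction L with
  | nil => simp [pvAdjSum]
  | cons x t ih =>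
      rw [List.length_cons, List.range_succ_eq_map, List.map_cons, List.sum_cons, List.map_map]
      have hshift :
          ((List.range t.length).map
            ((fun i =>
              if (i + 1 < t.length + 1 ∧
                  PySem.Str.startswith ((x :: t).getD (i + 1) "") ((x :: t).getD i "") = true)
              then (0 : Int) else PySem.Str.len ((x :: t).getD i "") + 1) ∘ Nat.succ)) =
          (List.range t.length).map (fun i =>
            if (i + 1 < t.length ∧
                PySem.Str.startswith (t.getD (i + 1) "") (t.getD i "") = true)
            then (0 : Int) else PySem.Str.len (t.getD i "") + 1) := by
        apply List.map_congr_left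
        intro i _
        simp only [Function.comp_apply, Nat.succ_eq_add_one, List.getD_cons_succ]
        have : i + 1 + 1 < t.length + 1 ↔ i + 1 < t.length := by omega
        simp only [this]
      rw [hshift, ih]
      cases t with
      | nil => simp [pvAdjSum]
      | cons y t' =>
          simp only [List.getD_cons_succ, List.getD_cons_zero, pvAdjSum]
          by_cases hs : PySem.Str.startswith y x = true <;> simp

-- A's fold equals the adjacent-pair scan of the sorted list
lemma pvA_eq_adjSum (words : List String) :
    minimumLengthEncoding4 words =
      pvAdjSum (PySem.List.sorted (words.map pvRev) (fun x => x) false) := by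
  simp only [minimumLengthEncoding4]
  have hmap : words.map (fun w => (PySem.Str.slice? w none none (-1)).getD "") = words.map pvRev := by
    apply List.map_congr_left
    intro w _
    rw [PySem.Str.slice?_none_none_neg_one]
    rfl
  rw [hmap]
  have hlen : words.length = (PySem.List.sorted (words.map pvRev) (fun x => x) false).length := by
    rw [PySem.List.length_sorted, List.length_map]
  set L := PySem.List.sorted (words.map pvRev) (fun x => x) false with hL
  have hbody : ∀ (res i : Int),
      (if (i + 1 < (words.length : Int) ∧
          PySem.Str.startswith (PySem.List.pyGetD L (i + 1) "") (PySem.List.pyGetD L i "") = true)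
      then res
      else res + PySem.Str.len (PySem.List.pyGetD L i "") + 1) =
      res + (if (i + 1 < (words.length : Int) ∧
          PySem.Str.startswith (PySem.List.pyGetD L (i + 1) "") (PySem.List.pyGetD L i "") = true)
      then 0
      else PySem.Str.len (PySem.List.pyGetD L i "") + 1) := by
    intro res i
    split_ifs
    · ring
    · ring
  rw [show (fun (res i : Int) =>
      if (i + 1 < (words.length : Int) ∧
          PySem.Str.startswith (PySem.List.pyGetD L (i + 1) "") (PySem.List.pyGetD L i "") = true)
      then res
      else res + PySem.Str.len (PySem.List.pyGetD L i "") + 1) =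
      (fun (res i : Int) => res + (if (i + 1 < (words.length : Int) ∧
          PySem.Str.startswith (PySem.List.pyGetD L (i + 1) "") (PySem.List.pyGetD L i "") = true)
      then 0
      else PySem.Str.len (PySem.List.pyGetD L i "") + 1)) from funext fun res => funext fun i => hbody res i]
  rw [PySem.List.foldl_add]
  rw [PySem.List.pyRange_zero_natCast, List.map_map, zero_add]
  rw [← pvSumRange L, hlen]
  apply congrArg
  apply List.map_congr_left
  intro i hi
  simp only [Function.comp_apply]
  have h1 : ((i : Int) + 1) = ((i + 1 : Nat) : Int) := by push_cast; ring
  rw [h1, PySem.List.pyGetD_natCast, PySem.List.pyGetD_natCast]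
  simp only [Nat.cast_lt]

-- folding set-removals is one filter
lemma pvFoldl_filter_not_any {α γ : Type} (l : List α) (p : α → γ → Bool) :
    ∀ (s : List γ), l.foldl (fun s a => s.filter (fun y => !p a y)) s =
      s.filter (fun y => !l.any (fun a => p a y)) := by
  induction l with
  | nil => intro s; simp
  | cons a l ih =>
      intro s
      simp only [List.foldl_cons]
      rw [ih, List.filter_filter]
      apply List.filter_congr
      intro y _
      cases h1 : p a y <;> cases h2 : l.any (fun a => p a y) <;> simp [h1, h2]

-- the indices 1..len w strip exactly the proper suffixes of w
lemma pvRangeAny (w y : String) :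
    ((PySem.List.pyRange 1 (PySem.Str.len w + 1)).any
      (fun i => y == PySem.Str.slice w (some i) none)) =
    (decide (y ≠ w) && decide (y.toList <:+ w.toList)) := by
  rw [Bool.eq_iff_iff]
  simp only [List.any_eq_true, PySem.List.mem_pyRange_one, Bool.and_eq_true, decide_eq_true_eq,
    beq_iff_eq, PySem.Str.len_eq]
  constructor
  · rintro ⟨i, ⟨h1, h2⟩, rfl⟩
    have h0 : (0 : Int) ≤ i := by omega
    obtain ⟨k, rfl⟩ := Int.eq_ofNat_of_zero_le h0
    have hk1 : 1 ≤ k := by exact_mod_cast h1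
    have hk2 : k ≤ w.toList.length := by omega
    have htl : (PySem.Str.slice w (some (k : Int)) none).toList = w.toList.drop k := by
      rw [PySem.Str.toList_slice, PySem.Chars.slice_eq_listSlice, PySem.List.slice_from_natCast]
    constructor
    · intro he
      have := congrArg (fun s => s.toList.length) he
      simp only [htl, List.length_drop] at this
      omega
    · rw [htl]; exact List.drop_suffix _ _
  · rintro ⟨hne, hsuf⟩
    obtain ⟨pre, hpre⟩ := hsuf
    refine ⟨(pre.length : Int), ⟨?_, ?_⟩, ?_⟩
    · have : pre.length ≠ 0 := by
        intro h0
        rw [List.length_eq_zero_iff] at h0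
        subst h0
        exact hne (String.toList_inj.mp (by simpa using hpre))
      omega
    · have : pre.length + y.toList.length = w.toList.length := by
        rw [← hpre]; simp
      omega
    · apply (String.toList_inj).mp
      rw [PySem.Str.toList_slice, PySem.Chars.slice_eq_listSlice, PySem.List.slice_from_natCast,
        ← hpre, List.drop_left]

lemma pvAny_dedup (words : List String) (f : String → Bool) :
    (PySem.List.dedup words).any f = words.any f := by
  rw [Bool.eq_iff_iff]
  simp only [List.any_eq_true]
  constructor
  · rintro ⟨v, hv, hf⟩; exact ⟨v, (PySem.List.mem_dedup _ _).mp hv, hf⟩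
  · rintro ⟨v, hv, hf⟩; exact ⟨v, (PySem.List.mem_dedup _ _).mpr hv, hf⟩

lemma pvSum_filter (p : String → Bool) (f : String → Int) :
    ∀ (l : List String), ((l.filter p).map f).sum = (l.map (fun y => if p y then f y else 0)).sum := by
  intro l
  induction l with
  | nil => simp
  | cons a l ih => cases h : p a <;> simp [h, ih]

-- B equals the suffix-good sum over the deduplicated words
lemma pvB_eq (words : List String) :
    minimumLengthEncoding4_alt words =
      ((PySem.List.dedup words).map
        (fun w => if pvSGood words w then (w.toList.length : Int) + 1 else 0)).sum := by
  simp only [minimumLengthEncoding4_alt]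
  have hinner : ∀ (w : String) (s : List String),
      (PySem.List.pyRange 1 (PySem.Str.len w + 1)).foldl
        (fun s i => PySem.Set.discard s (PySem.Str.slice w (some i) none)) s =
      s.filter (fun y => !(decide (y ≠ w) && decide (y.toList <:+ w.toList))) := by
    intro w s
    have := pvFoldl_filter_not_any (PySem.List.pyRange 1 (PySem.Str.len w + 1))
      (fun i y => y == PySem.Str.slice w (some i) none) s
    rw [show (fun (s : List String) (i : Int) => PySem.Set.discard s (PySem.Str.slice w (some i) none)) =
        (fun (s : List String) (i : Int) => s.filter (fun y => !(y == PySem.Str.slice w (some i) none))) from rfl]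
    rw [this]
    apply List.filter_congr
    intro y _
    rw [pvRangeAny]
  rw [show (fun (s : List String) (w : String) =>
      (PySem.List.pyRange 1 (PySem.Str.len w + 1)).foldl
        (fun s i => PySem.Set.discard s (PySem.Str.slice w (some i) none)) s) =
     (fun (s : List String) (w : String) =>
       s.filter (fun y => !(decide (y ≠ w) && decide (y.toList <:+ w.toList)))) from
     funext fun s => funext fun w => hinner w s]
  rw [pvFoldl_filter_not_any (PySem.Set.ofList words)
    (fun w y => decide (y ≠ w) && decide (y.toList <:+ w.toList))]
  rw [← PySem.List.dedup_eq_ofList]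
  have hpred : (fun (y : String) => !(PySem.List.dedup words).any
      (fun w => decide (y ≠ w) && decide (y.toList <:+ w.toList))) = (fun y => pvSGood words y) := by
    funext y
    rw [pvAny_dedup]
    rfl
  rw [hpred, pvSum_filter]
  apply congrArg
  apply List.map_congr_left
  intro w _
  rw [PySem.Str.len_eq]

-- the bridge between the reversed-sorted world and the plain world
lemma pvBridge (words : List String) :
    pvAdjSum (PySem.List.sorted (words.map pvRev) (fun x => x) false) =
      ((PySem.List.dedup words).map
        (fun w => if pvSGood words w then (w.toList.length : Int) + 1 else 0)).sum := by
  set L := PySem.List.sorted (words.map pvRev) (fun x => x) false with hL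
  have hpw : L.Pairwise (· ≤ ·) := PySem.List.sorted_pairwise (words.map pvRev) (fun x => x)
  rw [pvAdjSum_sorted L hpw]
  have hperm : L.dedup.Perm ((PySem.List.dedup words).map pvRev) := by
    apply List.perm_of_nodup_nodup_toFinset_eq
    · exact List.nodup_dedup L
    · exact (PySem.List.nodup_dedup words).map pvRev_inj
    · apply Finset.ext
      intro u
      simp only [List.mem_toFinset, List.mem_dedup, List.mem_map]
      rw [hL, PySem.List.mem_sorted]
      constructor
      · intro hu
        rcases List.mem_map.mp hu with ⟨v, hv, rfl⟩
        exact ⟨v, (PySem.List.mem_dedup _ _).mpr hv, rfl⟩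
      · rintro ⟨v, hv, rfl⟩
        exact List.mem_map.mpr ⟨v, (PySem.List.mem_dedup _ _).mp hv, rfl⟩
  rw [(hperm.map (pvH L)).sum_eq, List.map_map]
  apply congrArg
  apply List.map_congr_left
  intro w _
  have hlen : (pvRev w).toList.length = w.toList.length := by
    rw [pvRev_toList, List.length_reverse]
  have hgood : pvPGood L (pvRev w) = pvSGood words w := by
    rw [Bool.eq_iff_iff, pvPGood_iff, pvSGood_iff]
    apply not_congr
    constructor
    · rintro ⟨y, hy, hne, hp⟩
      rw [hL, PySem.List.mem_sorted] at hy
      rcases List.mem_map.mp hy with ⟨v, hv, rfl⟩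
      refine ⟨v, hv, fun h => hne (by rw [h]), ?_⟩
      rw [pvRev_toList, pvRev_toList] at hp
      exact List.reverse_prefix.mp hp
    · rintro ⟨v, hv, hne, hsuf⟩
      refine ⟨pvRev v, ?_, fun h => hne (pvRev_inj h), ?_⟩
      · rw [hL, PySem.List.mem_sorted]
        exact List.mem_map.mpr ⟨v, hv, rfl⟩
      · rw [pvRev_toList, pvRev_toList]
        exact List.reverse_prefix.mpr hsuf
  simp only [Function.comp_apply, pvH, hgood, hlen]

-- ===== VERDICT (by name: the statement is the Claim_ definition above) =====
theorem minimumLengthEncoding4_spec : Claim_equal_minimumLengthEncoding4 := by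
  intro words _
  unfold Spec_minimumLengthEncoding4
  rw [pvA_eq_adjSum, pvBridge, pvB_eq]
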